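-- pv_equiv track=rewrite | github.com/Marassanovad/Python | Lesson_9/game.py | show_map
-- ===== SOURCE A (Python) =====
-- def show_map(field):
--     txt = ''
--     for i in range(len(field)):
--         if not i % 3:
--             txt += f'\n{"-" * 25}\n'
--         txt += f'{field[i]:^8}'
--     txt += f"\n{'-' * 25}"
--     return txt
-- ===== SOURCE B (Python) =====
-- def show_map(field):
--     sep = '\n' + '-' * 25
--     blocks = []
--     for j in range(0, len(field), 3):
--         blocks.append(sep + '\n' + ''.join(f'{x:^8}' for x in field[j:j+3]))
--     return ''.join(blocks) + sep
-- ===== Notes on version B (the rewrite author's own statement) =====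
-- stated objective: simpler
-- what changed: B slices the field into rows of three and joins one block per row, replacing A's single index loop that tests i % 3 to decide when to emit the separator.
import Mathlib
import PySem

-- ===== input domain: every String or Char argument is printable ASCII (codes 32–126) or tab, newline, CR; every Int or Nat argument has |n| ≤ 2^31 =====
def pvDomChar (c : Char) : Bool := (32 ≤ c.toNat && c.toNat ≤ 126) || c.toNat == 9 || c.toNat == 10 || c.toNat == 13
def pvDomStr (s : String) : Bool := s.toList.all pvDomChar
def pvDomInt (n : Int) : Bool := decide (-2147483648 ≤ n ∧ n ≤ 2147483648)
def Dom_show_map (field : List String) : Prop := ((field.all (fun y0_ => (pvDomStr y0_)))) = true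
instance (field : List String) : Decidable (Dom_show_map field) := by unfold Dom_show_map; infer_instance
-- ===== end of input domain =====

-- B groups the field into rows of three by slicing and joins per-row blocks, instead of A's
-- index loop with the i % 3 separator trick (objective: simpler decomposition, same cost).

-- ===== PORT A =====
-- exact port of the f-string 'f"{x:^8}"' (space fill, width 8, extra pad on the right), used by both Pythons
def center8 (s : String) : String :=
  let n := s.toList.length
  if 8 ≤ n then s
  else
    let pad := 8 - n
    let l := pad / 2
    String.ofList (List.replicate l ' ') ++ s ++ String.ofList (List.replicate (pad - l) ' ')

-- '-' * 25
def pvDashes : String := String.ofList (List.replicate 25 '-')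

def show_map (field : List String) : String :=
  let txt := (PySem.List.pyRange 0 (field.length : Int) 1).foldl
    (fun txt i =>
      let txt := if PySem.Int.mod i 3 = 0 then txt ++ ("\n" ++ pvDashes ++ "\n") else txt
      txt ++ center8 (PySem.List.pyGetD field i "")) ""
  txt ++ ("\n" ++ pvDashes)

-- ===== PORT B =====
def pvSep : String := "\n" ++ pvDashes

-- the row loop of Source B: one block per j in range(0, len(field), 3), from the slice field[j:j+3]
def show_map_alt (field : List String) : String :=
  String.join ((PySem.List.pyRange 0 (field.length : Int) 3).map (fun j =>
    pvSep ++ "\n" ++ String.join ((PySem.List.slice field (some j) (some (j + 3))).map center8))) ++ pvSep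

-- ===== PRECONDITION & SPEC =====
def Spec_show_map (field : List String) (out : String) : Prop := out = show_map_alt field
instance (field : List String) (out : String) : Decidable (Spec_show_map field out) := by unfold Spec_show_map; infer_instance

-- ===== CLAIM (what is proved, stated in full; the proofs are below) =====
def Claim_equal_show_map : Prop := ∀ (field : List String), Dom_show_map field → Spec_show_map field (show_map field)

-- ===== LEMMAS AND PROOFS =====

-- proof-side chunked view shared by both directions: one string per row of three
def pvBlocks : List String → List String
  | [] => []
  | x :: rest =>
      (pvSep ++ "\n" ++ String.join (((x :: rest).take 3).map center8)) :: pvBlocks ((x :: rest).drop 3)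
  termination_by xs => xs.length
  decreasing_by simp

theorem pv_pyRange3_eq_nil (a b : Int) (h : b ≤ a) : PySem.List.pyRange a b 3 = [] := by
  simp [PySem.List.pyRange, show ¬ a < b by omega]

theorem pv_pyRange3_cons (a b : Int) (h : a < b) :
    PySem.List.pyRange a b 3 = a :: PySem.List.pyRange (a + 3) b 3 := by
  simp only [PySem.List.pyRange, if_neg (show (3:Int) ≠ 0 by norm_num),
    if_pos (show (0:Int) < 3 by norm_num), if_pos h]
  by_cases h3 : a + 3 < b
  · rw [if_pos h3,
      show ((b - a + 3 - 1) / 3).toNat = ((b - (a + 3) + 3 - 1) / 3).toNat + 1 by omega,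
      List.range_succ_eq_map]
    simp only [List.map_cons, List.map_map]
    congr 1
    · norm_num
    · apply List.map_congr_left
      intro k _
      simp only [Function.comp]
      push_cast; ring
  · rw [if_neg h3, show ((b - a + 3 - 1) / 3).toNat = 1 by omega]
    simp [List.range_succ]

theorem pv_alt_chunks (field : List String) : ∀ (m a : Nat), field.length - a ≤ m →
    (PySem.List.pyRange (a : Int) (field.length : Int) 3).map (fun j =>
      pvSep ++ "\n" ++ String.join ((PySem.List.slice field (some j) (some (j + 3))).map center8))
    = pvBlocks (field.drop a) := by
  intro m
  induction m with
  | zero =>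
      intro a ha
      have hlen : field.length ≤ a := by omega
      rw [pv_pyRange3_eq_nil _ _ (by exact_mod_cast hlen), List.drop_eq_nil_of_le hlen]
      simp [pvBlocks]
  | succ m ih =>
      intro a ha
      by_cases hlt : a < field.length
      · rw [pv_pyRange3_cons _ _ (by exact_mod_cast hlt)]
        simp only [List.map_cons]
        rw [show ((a : Int) + 3) = ((a + 3 : Nat) : Int) by push_cast; ring,
          ih (a + 3) (by omega), PySem.List.slice_natCast,
          show a + 3 - a = 3 by omega]
        have hne : field.drop a ≠ [] := by
          intro hnil
          have := List.drop_eq_nil_iff.mp hnil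
          omega
        obtain ⟨x, rest, hx⟩ := List.exists_cons_of_ne_nil hne
        rw [hx, show field.drop (a + 3) = (field.drop a).drop 3 by
            rw [List.drop_drop], hx]
        simp [pvBlocks]
      · rw [pv_pyRange3_eq_nil _ _ (by exact_mod_cast (by omega : field.length ≤ a)),
          List.drop_eq_nil_of_le (by omega)]
        simp [pvBlocks]

-- A's loop body, over (index, element) pairs
def pvBodyE (txt : String) (p : Int × String) : String :=
  let txt := if PySem.Int.mod p.1 3 = 0 then txt ++ ("\n" ++ pvDashes ++ "\n") else txt
  txt ++ center8 p.2

theorem pv_foldl_append (l : List String) (s : String) :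
    l.foldl (· ++ ·) s = s ++ l.foldl (· ++ ·) "" := by
  induction l generalizing s with
  | nil => simp [List.foldl]
  | cons b t ih =>
      simp only [List.foldl]
      rw [ih (s ++ b), ih ((""
        : String) ++ b)]
      simp [String.append_assoc]

theorem pv_join_nil : String.join ([] : List String) = "" := rfl

theorem pv_join_cons (a : String) (l : List String) :
    String.join (a :: l) = a ++ String.join l := by
  simp only [String.join, List.foldl]
  rw [pv_foldl_append l ((""
    : String) ++ a)]
  simp [String.append_assoc]

theorem pv_key (xs : List String) : ∀ (s : Int), 0 ≤ s → s % 3 = 0 → ∀ txt : String,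
    (PySem.List.enumerate xs s).foldl pvBodyE txt = txt ++ String.join (pvBlocks xs) := by
  induction xs using pvBlocks.induct with
  | case1 =>
      intro s _ _ txt
      simp [PySem.List.enumerate_nil, pvBlocks, String.join]
  | case2 x rest ih =>
      intro s hs0 hs3 txt
      have hd0 : (3:Int) ∣ s := by omega
      have hd1 : ¬ (3:Int) ∣ (s + 1) := by omega
      have hd2 : ¬ (3:Int) ∣ (s + 1 + 1) := by omega
      have hm0 : PySem.Int.mod s 3 = 0 := by
        rw [PySem.Int.mod_eq_emod_of_pos (by omega)]; exact hs3
      have hm1 : ¬ PySem.Int.mod (s + 1) 3 = 0 := by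
        rw [PySem.Int.mod_eq_emod_of_pos (by omega)]; omega
      have hm2 : ¬ PySem.Int.mod (s + 1 + 1) 3 = 0 := by
        rw [PySem.Int.mod_eq_emod_of_pos (by omega)]; omega
      match rest with
      | [] =>
          simp [PySem.List.enumerate_cons, PySem.List.enumerate_nil, pvBlocks, pvBodyE,
            hm0, hd0, pv_join_cons, pv_join_nil, pvSep, String.append_assoc]
      | [y] =>
          simp [PySem.List.enumerate_cons, PySem.List.enumerate_nil, pvBlocks, pvBodyE,
            hm0, hm1, hd0, hd1, pv_join_cons, pv_join_nil, pvSep, String.append_assoc]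
      | y :: z :: rest' =>
          have hm3 : (s + 3) % 3 = 0 := by omega
          simp only [PySem.List.enumerate_cons, List.foldl]
          have hdrop : (x :: y :: z :: rest').drop 3 = rest' := rfl
          rw [show s + 1 + 1 + 1 = s + 3 by ring] at *
          rw [hdrop] at ih
          rw [ih (s + 3) (by omega) hm3]
          simp [pvBlocks, pvBodyE, hm0, hm1, hm2, hd0, hd1, hd2, pv_join_cons, pvSep,
            String.append_assoc, String.join]
          rw [pv_foldl_append (pvBlocks rest')
            ("\n" ++ (pvDashes ++ ("\n" ++ (center8 x ++ (center8 y ++ center8 z)))))]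
          simp [String.append_assoc]

-- ===== VERDICT (by name: the statement is the Claim_ definition above) =====
theorem show_map_spec : Claim_equal_show_map := by
  intro field _
  unfold Spec_show_map show_map show_map_alt
  have henum := PySem.List.enumerate_eq_map_pyRange (xs := field) (d := "")
  have hfold :
      (PySem.List.pyRange 0 (field.length : Int) 1).foldl
        (fun txt i =>
          let txt := if PySem.Int.mod i 3 = 0 then txt ++ ("\n" ++ pvDashes ++ "\n") else txt
          txt ++ center8 (PySem.List.pyGetD field i "")) ""
      = (PySem.List.enumerate field 0).foldl pvBodyE "" := by
    rw [henum, List.foldl_map]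
    rfl
  rw [hfold, pv_key field 0 (by omega) (by omega) ""]
  rw [show ((0 : Int)) = ((0 : Nat) : Int) by norm_num,
    pv_alt_chunks field field.length 0 (by omega), List.drop_zero]
  simp [pvSep]
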